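-- pv_equiv track=rewrite | github.com/wayyoungboy/oceanbase-diagnostic-tool | src/handler/analyzer/analyze_log.py | __get_observer_ret_code
-- ===== SOURCE A (Python) =====
-- def __get_observer_ret_code(log_line):
--     """
--     Get the ret code from the observer log
--     :param log_line
--     :return: ret_code
--     """
--     prefix = "ret=-"
--     idx = log_line.find(prefix)
--     if idx < 0:
--         return ""
--     start = idx + len(prefix)
--     if start >= len(log_line):
--         return ""
--     end = start
--     while end < len(log_line):
--         c = log_line[end]
--         if c < '0' or c > '9':
--             break
--         end = end + 1
--     return "-" + log_line[start:end]
-- ===== SOURCE B (Python) =====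
-- def __get_observer_ret_code(log_line):
--     """
--     Get the ret code from the observer log
--     :param log_line
--     :return: ret_code
--     """
--     pat = "ret=-"
--     state = 0  # number of chars of pat matched so far; 5 = collecting digits
--     found = False
--     digits = []
--     for c in log_line:
--         if state == 5:
--             found = True
--             if "0" <= c <= "9":
--                 digits.append(c)
--             else:
--                 break
--         elif c == pat[state]:
--             state += 1
--         elif c == "r":
--             state = 1
--         else:
--             state = 0
--     return "-" + "".join(digits) if found else ""
-- ===== Notes on version B (the rewrite author's own statement) =====
-- stated objective: alternative
-- what changed: Replaces A's two-phase find-then-rescan (str.find for "ret=-", then a second index-based loop over the digits) with a single left-to-right pass driven by a 6-state string-matching automaton (KMP-style failure links for the pattern written out by hand) that matches the marker and accumulates the digit run in the same loop.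
import Mathlib
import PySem

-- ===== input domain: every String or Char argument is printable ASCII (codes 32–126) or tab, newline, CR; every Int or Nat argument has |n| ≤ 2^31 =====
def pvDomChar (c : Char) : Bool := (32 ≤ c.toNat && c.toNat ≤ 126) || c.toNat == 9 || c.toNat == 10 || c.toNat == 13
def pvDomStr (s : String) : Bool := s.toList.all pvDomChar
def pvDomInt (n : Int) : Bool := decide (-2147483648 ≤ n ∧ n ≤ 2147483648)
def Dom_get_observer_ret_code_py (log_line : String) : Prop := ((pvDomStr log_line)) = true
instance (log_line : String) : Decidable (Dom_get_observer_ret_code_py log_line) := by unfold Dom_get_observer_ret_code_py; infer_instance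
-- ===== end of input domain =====

-- B replaces A's two-phase find-then-rescan with a single left-to-right pass: a 6-state
-- string-matching automaton (KMP-style failure links for "ret=-" written out by hand) that
-- matches the marker and collects the digit run in the same loop (alternative; same cost).

-- ===== PORT A =====
-- A's while loop: advance `e` while log_line[e] is between '0' and '9'
-- (Python compares length-1 strings; on single characters that is exactly Char `<`).
def pvALoop (cs : List Char) (e : Nat) : Nat :=
  if h : e < cs.length then
    let c := cs[e]
    if c < '0' ∨ '9' < c then e else pvALoop cs (e + 1)
  else e
termination_by cs.length - e

def get_observer_ret_code_py (log_line : String) : String :=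
  let pre := "ret=-"
  let idx := PySem.Str.find log_line pre
  if idx < 0 then ""
  else
    let start : Int := idx + (PySem.Str.len pre : Int)
    if (PySem.Str.len log_line : Int) ≤ start then ""
    else
      let e := pvALoop log_line.toList start.toNat
      "-" ++ PySem.Str.slice log_line (some start) (some (e : Int))

-- ===== PORT B =====
-- the pattern "ret=-" (B's `pat` variable)
def pvPat : List Char := ['r', 'e', 't', '=', '-']

-- B's for loop: state = number of chars of pat matched (5 = collecting digits), the found flag
-- and the digits accumulator; `break` / end of string become the returns of the recursion.
def pvBScan : List Char → Nat → Bool → List Char → List Char × Bool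
  | [], _, found, digits => (digits, found)
  | c :: rest, state, found, digits =>
    if state = 5 then
      if '0' ≤ c ∧ c ≤ '9' then pvBScan rest 5 true (digits ++ [c])
      else (digits, true)
    else if c = pvPat.getD state ' ' then pvBScan rest (state + 1) found digits
    else if c = 'r' then pvBScan rest 1 found digits
    else pvBScan rest 0 found digits

def get_observer_ret_code_py_alt (log_line : String) : String :=
  let r := pvBScan log_line.toList 0 false []
  if r.2 then String.ofList ('-' :: r.1) else ""

-- ===== PRECONDITION & SPEC =====
def Spec_get_observer_ret_code_py (log_line : String) (out : String) : Prop := out = get_observer_ret_code_py_alt log_line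
instance (log_line : String) (out : String) : Decidable (Spec_get_observer_ret_code_py log_line out) := by unfold Spec_get_observer_ret_code_py; infer_instance

-- ===== CLAIM (what is proved, stated in full; the proofs are below) =====
def Claim_equal_get_observer_ret_code_py : Prop := ∀ (log_line : String), Dom_get_observer_ret_code_py log_line → Spec_get_observer_ret_code_py log_line (get_observer_ret_code_py log_line)

-- ===== LEMMAS AND PROOFS =====

-- the digit test '0' <= c <= '9' as a Bool
def pvIsDig (c : Char) : Bool := decide ('0' ≤ c ∧ c ≤ '9')

-- index of the first occurrence of pvPat (none if absent): the common reference point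
def pvFirst : List Char → Option Nat
  | [] => none
  | c :: t => if pvPat <+: c :: t then some 0 else (pvFirst t).map (· + 1)

-- the common specification both ports are reduced to
def pvSpecPair (cs : List Char) : List Char × Bool :=
  match pvFirst cs with
  | none => ([], false)
  | some i =>
      let r := cs.drop (i + 5)
      if r = [] then ([], false) else (r.takeWhile pvIsDig, true)

lemma pvB_r (u : List Char) (f : Bool) (d : List Char) :
    pvBScan ('r' :: u) 0 f d = pvBScan u 1 f d := by simp [pvBScan, pvPat]

lemma pvB5_true (cs : List Char) : ∀ d, pvBScan cs 5 true d = (d ++ cs.takeWhile pvIsDig, true) := by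
  induction cs with
  | nil => intro d; simp [pvBScan]
  | cons c rest ih =>
    intro d
    by_cases h : '0' ≤ c ∧ c ≤ '9'
    · simp [pvBScan, h, ih, pvIsDig]
    · simp [pvBScan, h, pvIsDig]

lemma pvB5_false (cs : List Char) (d : List Char) :
    pvBScan cs 5 false d = if cs = [] then (d, false) else (d ++ cs.takeWhile pvIsDig, true) := by
  cases cs with
  | nil => simp [pvBScan]
  | cons c rest =>
    by_cases h : '0' ≤ c ∧ c ≤ '9'
    · simp [pvBScan, h, pvB5_true, pvIsDig]
    · simp [pvBScan, h, pvIsDig]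

lemma pvSpec_shift (c : Char) (t : List Char) (h : ¬ pvPat <+: c :: t) :
    pvSpecPair (c :: t) = pvSpecPair t := by
  unfold pvSpecPair
  rw [show pvFirst (c :: t) = (pvFirst t).map (· + 1) from by simp [pvFirst, h]]
  cases pvFirst t with
  | none => rfl
  | some i => simp [List.drop_succ_cons]

lemma pvSpec_shift_ne_r (c : Char) (t : List Char) (h : c ≠ 'r') :
    pvSpecPair (c :: t) = pvSpecPair t := by
  apply pvSpec_shift
  simp [pvPat, List.cons_prefix_cons]
  intro h'; exact absurd h'.symm h

lemma pvSpec_full (t : List Char) (h : ['e','t','=','-'] <+: t) :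
    pvSpecPair ('r' :: t) = (if t.drop 4 = [] then ([], false) else ((t.drop 4).takeWhile pvIsDig, true)) := by
  have hp : pvPat <+: 'r' :: t := by
    simpa [pvPat, List.cons_prefix_cons] using h
  unfold pvSpecPair
  rw [show pvFirst ('r' :: t) = some 0 from by simp [pvFirst, hp]]
  simp [List.drop_succ_cons]

lemma pvSpec_shift_r (t : List Char) (hp : ¬ ['e','t','=','-'] <+: t) :
    pvSpecPair ('r' :: t) = pvSpecPair t := by
  apply pvSpec_shift
  intro hx
  exact hp (by simpa [pvPat, List.cons_prefix_cons] using hx)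

-- correctness of B's automaton: it computes (digit run after first "ret=-", seen-a-char-after flag)
lemma pvB_main : ∀ n (cs : List Char), cs.length ≤ n → pvBScan cs 0 false [] = pvSpecPair cs := by
  intro n
  induction n with
  | zero =>
    intro cs h
    have : cs = [] := List.eq_nil_of_length_eq_zero (by omega)
    subst this; simp [pvBScan, pvSpecPair, pvFirst]
  | succ n ih =>
    intro cs h
    cases cs with
    | nil => simp [pvBScan, pvSpecPair, pvFirst]
    | cons c t =>
      by_cases hc : c = 'r'
      case neg =>
        rw [show pvBScan (c :: t) 0 false [] = pvBScan t 0 false [] from by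
              simp [pvBScan, pvPat, hc],
            ih t (by simp at h; omega), pvSpec_shift_ne_r c t hc]
      case pos =>
        subst hc
        by_cases hp : ['e','t','=','-'] <+: t
        case pos =>
          obtain ⟨u, rfl⟩ := hp
          rw [show pvBScan ('r' :: (['e','t','=','-'] ++ u)) 0 false [] = pvBScan u 5 false [] from by
                simp [pvBScan, pvPat],
              pvB5_false, pvSpec_full _ ⟨u, rfl⟩]
          simp
        case neg =>
          rw [pvSpec_shift_r t hp]
          cases t with
          | nil => simp [pvBScan, pvPat, pvSpecPair, pvFirst]
          | cons c1 t1 =>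
            by_cases h1 : c1 = 'e'
            case neg =>
              by_cases hr : c1 = 'r'
              · subst hr
                rw [show pvBScan ('r' :: 'r' :: t1) 0 false [] = pvBScan ('r' :: t1) 0 false [] from by
                      simp [pvBScan, pvPat]]
                exact ih _ (by simp at h ⊢; omega)
              · rw [show pvBScan ('r' :: c1 :: t1) 0 false [] = pvBScan t1 0 false [] from by
                      rw [pvB_r]; simp [pvBScan, pvPat, h1, hr],
                    ih t1 (by simp at h; omega), pvSpec_shift_ne_r c1 t1 hr]
            case pos =>
              subst h1
              rw [pvSpec_shift_ne_r 'e' t1 (by decide)]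
              cases t1 with
              | nil => simp [pvBScan, pvPat, pvSpecPair, pvFirst]
              | cons c2 t2 =>
                by_cases h2 : c2 = 't'
                case neg =>
                  by_cases hr : c2 = 'r'
                  · subst hr
                    rw [show pvBScan ('r' :: 'e' :: 'r' :: t2) 0 false [] = pvBScan ('r' :: t2) 0 false [] from by
                          simp [pvBScan, pvPat]]
                    exact ih _ (by simp at h ⊢; omega)
                  · rw [show pvBScan ('r' :: 'e' :: c2 :: t2) 0 false [] = pvBScan t2 0 false [] from by
                          simp [pvBScan, pvPat, h2, hr],
                        ih t2 (by simp at h; omega), pvSpec_shift_ne_r c2 t2 hr]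
                case pos =>
                  subst h2
                  rw [pvSpec_shift_ne_r 't' t2 (by decide)]
                  cases t2 with
                  | nil => simp [pvBScan, pvPat, pvSpecPair, pvFirst]
                  | cons c3 t3 =>
                    by_cases h3 : c3 = '='
                    case neg =>
                      by_cases hr : c3 = 'r'
                      · subst hr
                        rw [show pvBScan ('r' :: 'e' :: 't' :: 'r' :: t3) 0 false [] = pvBScan ('r' :: t3) 0 false [] from by
                              simp [pvBScan, pvPat]]
                        exact ih _ (by simp at h ⊢; omega)
                      · rw [show pvBScan ('r' :: 'e' :: 't' :: c3 :: t3) 0 false [] = pvBScan t3 0 false [] from by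
                              simp [pvBScan, pvPat, h3, hr],
                            ih t3 (by simp at h; omega), pvSpec_shift_ne_r c3 t3 hr]
                    case pos =>
                      subst h3
                      rw [pvSpec_shift_ne_r '=' t3 (by decide)]
                      cases t3 with
                      | nil => simp [pvBScan, pvPat, pvSpecPair, pvFirst]
                      | cons c4 t4 =>
                        have h4 : c4 ≠ '-' := by
                          intro hh; subst hh; exact hp ⟨t4, rfl⟩
                        by_cases hr : c4 = 'r'
                        · subst hr
                          rw [show pvBScan ('r' :: 'e' :: 't' :: '=' :: 'r' :: t4) 0 false [] = pvBScan ('r' :: t4) 0 false [] from by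
                                simp [pvBScan, pvPat]]
                          exact ih _ (by simp at h ⊢; omega)
                        · rw [show pvBScan ('r' :: 'e' :: 't' :: '=' :: c4 :: t4) 0 false [] = pvBScan t4 0 false [] from by
                                simp [pvBScan, pvPat, h4, hr],
                              ih t4 (by simp at h; omega), pvSpec_shift_ne_r c4 t4 hr]

lemma pvFirst_eq_none (cs : List Char) (h : ∀ j, ¬ pvPat <+: cs.drop j) : pvFirst cs = none := by
  induction cs with
  | nil => rfl
  | cons c t ih =>
    have h0 : ¬ pvPat <+: c :: t := by simpa using h 0
    simp [pvFirst, h0]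
    exact ih fun j => by simpa using h (j + 1)

lemma pvFirst_eq_some : ∀ (cs : List Char) (n : Nat), pvPat <+: cs.drop n →
    (∀ j < n, ¬ pvPat <+: cs.drop j) → pvFirst cs = some n := by
  intro cs
  induction cs with
  | nil =>
    intro n hp _
    simp at hp
    exact absurd hp (by simp [pvPat])
  | cons c t ih =>
    intro n hp hmin
    cases n with
    | zero => simp at hp; simp [pvFirst, hp]
    | succ n =>
      have h0 : ¬ pvPat <+: c :: t := by simpa using hmin 0 (Nat.succ_pos n)
      have ht : pvFirst t = some n := ih n (by simpa [List.drop_succ_cons] using hp)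
        (fun j hj => by simpa [List.drop_succ_cons] using hmin (j + 1) (by omega))
      simp [pvFirst, h0, ht]

-- B's digit test agrees with A's break condition ¬(c < '0' ∨ '9' < c)
lemma pvIsDig_eq (c : Char) : pvIsDig c = !(decide (c < '0') || decide ('9' < c)) := by
  unfold pvIsDig
  by_cases h1 : c < '0'
  · simp [h1, not_le_of_gt h1]
  · by_cases h2 : '9' < c
    · simp [h1, h2, not_le_of_gt h2]
    · simp [h1, h2, le_of_not_gt h1, le_of_not_gt h2]

lemma pv_take_takeWhile (p : Char → Bool) (l : List Char) :
    l.take (l.takeWhile p).length = l.takeWhile p := by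
  induction l with
  | nil => simp
  | cons a t ih => by_cases h : p a <;> simp [h, ih]

-- A's while loop stops right after the leading digit run
lemma pvALoop_eq (cs : List Char) (e : Nat) :
    pvALoop cs e = e + ((cs.drop e).takeWhile (fun c => !(decide (c < '0') || decide ('9' < c)))).length := by
  fun_induction pvALoop cs e with
  | case1 e h c hbr =>
    have hd : cs.drop e = cs[e] :: cs.drop (e+1) := List.drop_eq_getElem_cons h
    have hb : (!(decide (cs[e] < '0') || decide ('9' < cs[e]))) = false := by
      simp
      intro hle
      rcases hbr with h' | h'
      · exact absurd hle (not_le.mpr h')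
      · exact h'
    rw [hd, List.takeWhile_cons, hb]
    simp
  | case2 e h c hbr ih =>
    have hd : cs.drop e = cs[e] :: cs.drop (e+1) := List.drop_eq_getElem_cons h
    have hb : (!(decide (cs[e] < '0') || decide ('9' < cs[e]))) = true := by
      push Not at hbr
      simp
      exact ⟨hbr.1, hbr.2⟩
    rw [hd, List.takeWhile_cons, hb, ih]
    simp
    omega
  | case3 e h =>
    have : cs.drop e = [] := List.drop_eq_nil_of_le (by omega)
    simp [this]

-- A also computes pvSpecPair (via find's first-occurrence characterisation), hence A = B
lemma pv_main (s : String) : get_observer_ret_code_py s = get_observer_ret_code_py_alt s := by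
  apply String.toList_inj.mp
  unfold get_observer_ret_code_py get_observer_ret_code_py_alt
  rw [pvB_main s.toList.length s.toList le_rfl]
  by_cases hneg : PySem.Chars.find s.toList ['r', 'e', 't', '=', '-'] < 0
  · have hnone : pvFirst s.toList = none := by
      apply pvFirst_eq_none
      intro j hpre
      have hin : PySem.Chars.isIn ['r', 'e', 't', '=', '-'] s.toList = true :=
        (PySem.Chars.exists_prefix_drop_iff_isIn _ _).mp ⟨j, by simpa [pvPat] using hpre⟩
      have h0 : (0 : Int) ≤ PySem.Chars.find s.toList ['r', 'e', 't', '=', '-'] :=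
        (PySem.Chars.find_nonneg_iff _ _).mpr ((PySem.Chars.isIn_iff_infix _ _).mp hin)
      omega
    simp [hneg, pvSpecPair, hnone]
  · push Not at hneg
    obtain ⟨hpre, hmin⟩ := PySem.Chars.find_spec (s := s.toList) (sub := ['r', 'e', 't', '=', '-']) (by simpa using hneg)
    obtain ⟨n, hn⟩ : ∃ n : ℕ, PySem.Chars.find s.toList ['r', 'e', 't', '=', '-'] = (n : Int) :=
      ⟨_, (Int.toNat_of_nonneg hneg).symm⟩
    rw [hn] at hpre hmin
    have hsome : pvFirst s.toList = some n := by
      apply pvFirst_eq_some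
      · simpa [pvPat] using hpre
      · intro j hj
        simpa [pvPat] using hmin j (by simpa using hj)
    have hfit : n + 5 ≤ s.length := by
      have h1 := hpre.length_le
      rw [List.length_drop] at h1
      simp at h1
      omega
    by_cases hend : s.length ≤ n + 5
    · have hre : s.toList.drop (n + 5) = [] := List.drop_eq_nil_of_le (by simpa using hend)
      simp [hn, show ¬((n : Int) < 0) from by omega,
            show ((s.length : Int) ≤ (n : Int) + 5) from by exact_mod_cast hend,
            pvSpecPair, hsome, hre]
    · have hrne : s.toList.drop (n + 5) ≠ [] := by
        rw [ne_eq, List.drop_eq_nil_iff]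
        simp
        omega
      simp [hn, show ¬((n : Int) < 0) from by omega,
            show ¬((s.length : Int) ≤ (n : Int) + 5) from by exact_mod_cast hend,
            pvSpecPair, hsome, hrne]
      have htn : ((n : Int) + 5).toNat = n + 5 := by omega
      rw [htn, show ((n : Int) + 5) = ((n + 5 : ℕ) : Int) by push_cast; ring, pvALoop_eq,
          PySem.List.slice_natCast]
      have hT : (n + 5) + ((s.toList.drop (n + 5)).takeWhile (fun c => !(decide (c < '0') || decide ('9' < c)))).length - (n + 5)
          = ((s.toList.drop (n + 5)).takeWhile (fun c => !(decide (c < '0') || decide ('9' < c)))).length := by omega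
      rw [hT, pv_take_takeWhile]
      have hpred : pvIsDig = (fun c => !(decide (c < '0') || decide ('9' < c))) := by
        funext c; exact pvIsDig_eq c
      rw [hpred]

-- ===== VERDICT (by name: the statement is the Claim_ definition above) =====
theorem get_observer_ret_code_py_spec : Claim_equal_get_observer_ret_code_py := by
  intro log_line _
  exact pv_main log_line
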